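-- pv_equiv track=rewrite | github.com/Jo-dv/new_algorithm | 프로그래머스/2/389479. 서버 증설 횟수/서버 증설 횟수.py | solution
-- ===== SOURCE A (Python) =====
-- def solution(players, m, k):
--     answer = 0
--     size = len(players)
--     server = [0] * size
--     answer = 0
--
--     for i in range(size):
--         if players[i] >= m:
--             n = players[i] // m  # 현재 필요한 서버 수
--
--             if server[i] < n:  # 서버 부족
--                 extra_server = n - server[i]
--                 if n * m <= players[i] < (n+1) * m:  # 증설했을 때 인원이 수용 가능하다면
--                     answer += extra_server
--                     for j in range(i, min(i+k, len(server))):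
--                         server[j] += extra_server
--
--     return answer
-- ===== SOURCE B (Python) =====
-- def solution(players, m, k):
--     # Difference-array sliding window: a running active-server sum instead of the inner range-update loop.
--     size = len(players)
--     diff = [0] * (size + 1)
--     answer = 0
--     cur = 0
--     for i, p in enumerate(players):
--         cur += diff[i]
--         if p >= m:
--             n = p // m
--             if cur < n and n * m <= p < (n + 1) * m:
--                 extra = n - cur
--                 answer += extra
--                 end = min(i + k, size)
--                 if end > i:
--                     cur += extra
--                     diff[end] -= extra
--     return answer
-- ===== Notes on version B (the rewrite author's own statement) =====
-- stated objective: alternative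
-- what changed: B replaces A's inner loop that adds the new servers to each of the next k slots by a difference array plus a running active-server sum, one update per player; A's inner loop is O(k) per expansion in the worst case, though amortized costs are similar on typical data.
import Mathlib
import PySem

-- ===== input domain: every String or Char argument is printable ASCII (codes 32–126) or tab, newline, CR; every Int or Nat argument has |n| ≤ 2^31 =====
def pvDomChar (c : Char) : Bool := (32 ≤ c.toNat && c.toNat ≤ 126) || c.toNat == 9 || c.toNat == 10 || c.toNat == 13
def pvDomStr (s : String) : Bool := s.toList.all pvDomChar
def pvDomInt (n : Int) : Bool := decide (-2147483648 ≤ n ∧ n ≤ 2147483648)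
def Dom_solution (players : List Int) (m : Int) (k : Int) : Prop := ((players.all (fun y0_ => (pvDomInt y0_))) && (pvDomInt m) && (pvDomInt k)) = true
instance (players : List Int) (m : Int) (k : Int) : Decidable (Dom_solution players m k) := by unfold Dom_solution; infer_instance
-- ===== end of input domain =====

-- B replaces A's inner range-update loop with a difference array and a running active-server sum.
-- ===== PORT A =====
-- inner loop body: server[j] += extra  (j comes from range(i, …), hence 0 ≤ j, so .toNat is exact)
def aInner (extra : Int) (server : List Int) (j : Int) : List Int :=
  server.set j.toNat (server.getD j.toNat 0 + extra)

-- one iteration of A's outer loop (i from range(size); players[i] is in range, getD is exact)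
def aStep (players : List Int) (m k : Int) (st : Int × List Int) (i : Nat) : Int × List Int :=
  let answer := st.1
  let server := st.2
  let p := players.getD i 0
  if p ≥ m then
    let n := PySem.Int.floordiv p m
    if server.getD i 0 < n then
      let extra := n - server.getD i 0
      if n * m ≤ p ∧ p < (n + 1) * m then
        (answer + extra,
         (PySem.List.pyRange (i : Int) (min ((i : Int) + k) (server.length : Int)) 1).foldl
           (aInner extra) server)
      else st
    else st
  else st

def solution (players : List Int) (m : Int) (k : Int) : Int :=
  ((List.range players.length).foldl (aStep players m k)
    (0, List.replicate players.length 0)).1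

-- ===== PORT B =====
-- one iteration of B's loop over `enumerate(players)`; the running index i is part of the state
def bStep (m k : Int) (size : Nat) (st : Int × Int × List Int × Nat) (p : Int) :
    Int × Int × List Int × Nat :=
  let answer := st.1
  let cur := st.2.1 + st.2.2.1.getD st.2.2.2 0
  let diff := st.2.2.1
  let i := st.2.2.2
  if p ≥ m then
    let n := PySem.Int.floordiv p m
    if cur < n ∧ n * m ≤ p ∧ p < (n + 1) * m then
      let extra := n - cur
      let e := min ((i : Int) + k) (size : Int)
      if (i : Int) < e then
        (answer + extra, cur + extra, diff.set e.toNat (diff.getD e.toNat 0 - extra), i + 1)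
      else (answer + extra, cur, diff, i + 1)
    else (answer, cur, diff, i + 1)
  else (answer, cur, diff, i + 1)

def solution_alt (players : List Int) (m : Int) (k : Int) : Int :=
  let size := players.length
  (players.foldl (bStep m k size) (0, 0, List.replicate (size + 1) 0, 0)).1

-- ===== PRECONDITION & SPEC =====
-- Pre_ excludes exactly the inputs where Python A raises ZeroDivisionError: m = 0 with some player count ≥ 0.
def Pre_solution (players : List Int) (m : Int) (k : Int) : Prop :=
  m ≠ 0 ∨ ∀ p ∈ players, p < 0
instance (players : List Int) (m : Int) (k : Int) : Decidable (Pre_solution players m k) := by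
  unfold Pre_solution; infer_instance

def pvWitness_solution : List Int × Int × Int := ([5, 12, 3, 7], 5, 2)

def Spec_solution (players : List Int) (m : Int) (k : Int) (out : Int) : Prop := out = solution_alt players m k
instance (players : List Int) (m : Int) (k : Int) (out : Int) : Decidable (Spec_solution players m k out) := by unfold Spec_solution; infer_instance

-- ===== CLAIM (what is proved, stated in full; the proofs are below) =====
def Claim_equal_solution : Prop := ∀ (players : List Int) (m : Int) (k : Int), Dom_solution players m k → Pre_solution players m k → Spec_solution players m k (solution players m k)

-- ===== LEMMAS AND PROOFS =====


-- getD after set, as one conditional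
theorem getD_set' (l : List Int) (a j : Nat) (v : Int) :
    (l.set a v).getD j 0 = if a = j ∧ a < l.length then v else l.getD j 0 := by
  by_cases h1 : a = j
  · subst h1
    by_cases h2 : a < l.length
    · simp [List.getD_eq_getElem?_getD, h2]
    · simp [List.getD_eq_getElem?_getD, h2]
  · simp [List.getD_eq_getElem?_getD, h1]

-- splitting an Icc-sum at the bottom
theorem sum_Icc_bot (f : Nat → Int) (i j : Nat) (h : i ≤ j) :
    ∑ t ∈ Finset.Icc i j, f t = f i + ∑ t ∈ Finset.Icc (i+1) j, f t := by
  rw [Finset.Icc_eq_cons_Ioc h, Finset.sum_cons]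
  congr 1
  apply Finset.sum_congr _ (fun _ _ => rfl)
  ext x
  simp only [Finset.mem_Ioc, Finset.mem_Icc]
  omega

-- A's inner loop, rewritten over List.range: effect on length and entries
theorem addRange_spec (extra : Int) :
    ∀ (cnt i : Nat) (server : List Int), i + cnt ≤ server.length →
      (((List.range cnt).foldl (fun s t => s.set (i + t) (s.getD (i + t) 0 + extra)) server).length
          = server.length
        ∧ ∀ j : Nat,
            ((List.range cnt).foldl (fun s t => s.set (i + t) (s.getD (i + t) 0 + extra)) server).getD j 0
              = server.getD j 0 + (if i ≤ j ∧ j < i + cnt then extra else 0)) := by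
  intro cnt
  induction cnt with
  | zero =>
    intro i server h
    constructor
    · rfl
    · intro j
      simp only [List.range_zero, List.foldl_nil]
      rw [if_neg (by omega : ¬ (i ≤ j ∧ j < i + 0))]
      ring
  | succ c ih =>
    intro i server h
    obtain ⟨hlen, hget⟩ := ih i server (by omega)
    rw [List.range_succ, List.foldl_append, List.foldl_cons, List.foldl_nil]
    refine ⟨by rw [List.length_set, hlen], ?_⟩
    intro j
    by_cases hj : i + c = j
    · subst hj
      rw [getD_set', if_pos ⟨rfl, by rw [hlen]; omega⟩, hget,
        if_neg (by omega : ¬ (i ≤ i + c ∧ i + c < i + c)),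
        if_pos (by omega : i ≤ i + c ∧ i + c < i + (c+1))]
      ring
    · rw [getD_set', if_neg (fun hc => hj hc.1), hget,
        if_congr (by omega : (i ≤ j ∧ j < i + c) ↔ (i ≤ j ∧ j < i + (c+1))) rfl rfl]

-- main simulation invariant
theorem mainInv (players : List Int) (m k : Int) :
    ∀ (n i : Nat) (ans : Int) (server : List Int) (cur : Int) (diff : List Int),
      i + n = players.length →
      server.length = players.length →
      diff.length = players.length + 1 →
      (∀ j : Nat, i ≤ j → j < players.length →
        server.getD j 0 = cur + ∑ t ∈ Finset.Icc i j, diff.getD t 0) →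
      ((List.range' i n).foldl (aStep players m k) (ans, server)).1
        = ((players.drop i).foldl (bStep m k players.length) (ans, cur, diff, i)).1 := by
  intro n
  induction n with
  | zero =>
    intro i ans server cur diff hin hsl hdl hinv
    have hdrop : players.drop i = [] := by
      apply List.drop_of_length_le
      omega
    rw [hdrop]
    rfl
  | succ n ih =>
    intro i ans server cur diff hin hsl hdl hinv
    have hi : i < players.length := by omega
    rw [List.range'_succ, List.drop_eq_getElem_cons hi, List.foldl_cons, List.foldl_cons]
    have hp : players.getD i 0 = players[i] := by
      rw [List.getD_eq_getElem?_getD, List.getElem?_eq_getElem hi]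
      rfl
    have hsi : server.getD i 0 = cur + diff.getD i 0 := by
      have := hinv i (le_refl i) hi
      simpa [Finset.Icc_self] using this
    have hinv' : ∀ j : Nat, i+1 ≤ j → j < players.length →
        server.getD j 0 = (cur + diff.getD i 0) + ∑ t ∈ Finset.Icc (i+1) j, diff.getD t 0 := by
      intro j h1 h2
      have hj := hinv j (by omega) h2
      rw [sum_Icc_bot _ i j (by omega)] at hj
      linarith
    set p := players[i] with hpdef
    by_cases hpm : p ≥ m
    case neg =>
      have hA : aStep players m k (ans, server) i = (ans, server) := by
        simp only [aStep]
        rw [hp, if_neg hpm]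
      have hB : bStep m k players.length (ans, cur, diff, i) p
          = (ans, cur + diff.getD i 0, diff, i+1) := by
        simp only [bStep]
        rw [if_neg hpm]
      rw [hA, hB]
      exact ih (i+1) ans server (cur + diff.getD i 0) diff (by omega) hsl hdl hinv'
    case pos =>
      set n' := PySem.Int.floordiv p m with hn'
      by_cases h1 : server.getD i 0 < n'
      case neg =>
        have h1b : ¬ (cur + diff.getD i 0 < n') := by rw [← hsi]; exact h1
        have hA : aStep players m k (ans, server) i = (ans, server) := by
          simp only [aStep]
          rw [hp, if_pos hpm, ← hn', if_neg h1]
        have hB : bStep m k players.length (ans, cur, diff, i) p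
            = (ans, cur + diff.getD i 0, diff, i+1) := by
          simp only [bStep]
          rw [if_pos hpm, ← hn',
            if_neg (fun hc => h1b hc.1 : ¬ (cur + diff.getD i 0 < n' ∧ n' * m ≤ p ∧ p < (n' + 1) * m))]
        rw [hA, hB]
        exact ih (i+1) ans server (cur + diff.getD i 0) diff (by omega) hsl hdl hinv'
      case pos =>
        by_cases h2 : n' * m ≤ p ∧ p < (n' + 1) * m
        case neg =>
          have hA : aStep players m k (ans, server) i = (ans, server) := by
            simp only [aStep]
            rw [hp, if_pos hpm, ← hn', if_pos h1, if_neg h2]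
          have hB : bStep m k players.length (ans, cur, diff, i) p
              = (ans, cur + diff.getD i 0, diff, i+1) := by
            simp only [bStep]
            rw [if_pos hpm, ← hn',
              if_neg (fun hc => h2 hc.2 : ¬ (cur + diff.getD i 0 < n' ∧ n' * m ≤ p ∧ p < (n' + 1) * m))]
          rw [hA, hB]
          exact ih (i+1) ans server (cur + diff.getD i 0) diff (by omega) hsl hdl hinv'
        case pos =>
          set curB := cur + diff.getD i 0 with hcurB
          have h1b : curB < n' := by rw [← hsi]; exact h1
          set extra := n' - curB with hextra
          have hextraA : n' - server.getD i 0 = extra := by rw [hsi, hextra]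
          set e' : Int := min ((i : Int) + k) ((players.length : Int)) with he'
          have hA : aStep players m k (ans, server) i
              = (ans + extra,
                 (PySem.List.pyRange (i : Int) e' 1).foldl (aInner extra) server) := by
            simp only [aStep]
            rw [hp, if_pos hpm, ← hn', if_pos h1, if_pos h2, hextraA, hsl, ← he']
          have hB : bStep m k players.length (ans, cur, diff, i) p
              = if (i : Int) < e' then
                  (ans + extra, curB + extra,
                   diff.set e'.toNat (diff.getD e'.toNat 0 - extra), i + 1)
                else (ans + extra, curB, diff, i + 1) := by
            simp only [bStep]
            rw [if_pos hpm, ← hn',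
              if_pos ((⟨h1b, h2⟩ :
                curB < n' ∧ n' * m ≤ p ∧ p < (n' + 1) * m) :
                cur + diff.getD i 0 < n' ∧ n' * m ≤ p ∧ p < (n' + 1) * m),
              ← hcurB, ← hextra, ← he']
          rw [hA, hB]
          by_cases hlt : (i : Int) < e'
          case pos =>
            rw [if_pos hlt]
            set e : Nat := e'.toNat with he
            have he1 : i < e := by omega
            have he2 : e ≤ players.length := by omega
            have hrange : PySem.List.pyRange (i : Int) e' 1
                = (List.range (e - i)).map (fun t : Nat => (i : Int) + t) := by
              rw [PySem.List.pyRange_one]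
              congr 2
              omega
            have hbody : (fun (s : List Int) (t : Nat) => aInner extra s ((i : Int) + t))
                = (fun s t => s.set (i + t) (s.getD (i + t) 0 + extra)) := by
              funext s t
              simp only [aInner]
              rw [show ((i : Int) + (t : Nat)).toNat = i + t by omega]
            rw [hrange, List.foldl_map, hbody]
            obtain ⟨hLen, hGet⟩ := addRange_spec extra (e - i) i server (by omega)
            have hie : i + (e - i) = e := by omega
            refine ih (i+1) (ans + extra) _ (curB + extra)
              (diff.set e (diff.getD e 0 - extra)) (by omega)
              (by rw [hLen, hsl]) (by rw [List.length_set, hdl]) ?_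
            intro j hj1 hj2
            have hd' : ∀ t : Nat, (diff.set e (diff.getD e 0 - extra)).getD t 0
                = diff.getD t 0 + (if t = e then -extra else 0) := by
              intro t
              rw [getD_set']
              by_cases ht : e = t
              · subst ht
                rw [if_pos ⟨rfl, by omega⟩, if_pos rfl]
                ring
              · rw [if_neg (fun hc => ht hc.1), if_neg (fun hc => ht hc.symm)]
                ring
            have hsum : ∑ t ∈ Finset.Icc (i+1) j, (diff.set e (diff.getD e 0 - extra)).getD t 0
                = (∑ t ∈ Finset.Icc (i+1) j, diff.getD t 0)
                  + (if e ∈ Finset.Icc (i+1) j then -extra else 0) := by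
              calc ∑ t ∈ Finset.Icc (i+1) j, (diff.set e (diff.getD e 0 - extra)).getD t 0
                  = ∑ t ∈ Finset.Icc (i+1) j, (diff.getD t 0 + (if t = e then -extra else 0)) :=
                    Finset.sum_congr rfl (fun t _ => hd' t)
                _ = (∑ t ∈ Finset.Icc (i+1) j, diff.getD t 0)
                    + ∑ t ∈ Finset.Icc (i+1) j, (if t = e then -extra else 0) :=
                    Finset.sum_add_distrib
                _ = _ := by rw [Finset.sum_ite_eq' (Finset.Icc (i+1) j) e (fun _ => -extra)]
            rw [hGet j, hsum, hinv' j hj1 hj2, hie]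
            by_cases hje : j < e
            · rw [if_pos (⟨by omega, hje⟩ : i ≤ j ∧ j < e),
                if_neg (fun hmem => by have := Finset.mem_Icc.mp hmem; omega :
                  ¬ e ∈ Finset.Icc (i+1) j)]
              ring
            · rw [if_neg (fun hc => hje hc.2 : ¬ (i ≤ j ∧ j < e)),
                if_pos (Finset.mem_Icc.mpr ⟨by omega, by omega⟩)]
              ring
          case neg =>
            rw [if_neg hlt]
            have hempty : PySem.List.pyRange (i : Int) e' 1 = [] := by
              rw [PySem.List.pyRange_one, show (e' - (i:Int)).toNat = 0 by omega]
              rfl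
            rw [hempty, List.foldl_nil]
            exact ih (i+1) (ans + extra) server curB diff (by omega) hsl hdl hinv'

theorem solution_eq_alt (players : List Int) (m k : Int) :
    solution players m k = solution_alt players m k := by
  unfold solution solution_alt
  rw [List.range_eq_range']
  have inv0 : ∀ j : Nat, 0 ≤ j → j < players.length →
      (List.replicate players.length (0:Int)).getD j 0
        = 0 + ∑ t ∈ Finset.Icc 0 j, (List.replicate (players.length + 1) (0:Int)).getD t 0 := by
    intro j _ hj
    rw [List.getD_replicate _ hj]
    rw [Finset.sum_congr rfl (fun t ht => List.getD_replicate (0:Int)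
      (show t < players.length + 1 by
        have := (Finset.mem_Icc.mp ht).2
        omega))]
    simp
  have h := mainInv players m k players.length 0 0 (List.replicate players.length 0) 0
    (List.replicate (players.length + 1) 0) (by omega) (by simp) (by simp) inv0
  simpa using h

-- ===== VERDICT (by name: the statement is the Claim_ definition above) =====
theorem solution_spec : Claim_equal_solution := by
  intro players m k _ _
  unfold Spec_solution
  exact solution_eq_alt players m k
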